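-- pv_equiv track=rewrite | github.com/slidracoon72/leetcode | Solutions/MinDiffBwLargest&Smallest.py | minDifference1
-- ===== SOURCE A (Python) =====
-- import heapq
-- from typing import List
--
-- def minDifference1(nums: List[int]) -> int:
--     # If the array has 4 or fewer elements, we can make all elements equal in at most 3 moves
--     if len(nums) <= 4:
--         return 0
--
--     # Get the smallest 4 elements and the largest 4 elements from nums using heaps
--     # heapq.nsmallest and heapq.nlargest have a time complexity of O(n log k)
--     min_four = sorted(heapq.nsmallest(4, nums))
--     max_four = sorted(heapq.nlargest(4, nums))
--
--     # Initialize the result with infinity as we are looking for the minimum difference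
--     res = float('inf')
--
--     # Iterate over the first 4 elements to compare the differences
--     for i in range(4):
--         # Calculate the difference between the i-th smallest element in max_four
--         # and the i-th largest element in min_four
--         res = min(res, max_four[i] - min_four[i])
--
--     # Return the minimum difference found
--     return res
-- ===== SOURCE B (Python) =====
-- def minDifference1(nums):
--     if len(nums) <= 4:
--         return 0
--     s = sorted(nums)
--     return min(s[-4] - s[0], s[-3] - s[1], s[-2] - s[2], s[-1] - s[3])
-- ===== Notes on version B (the rewrite author's own statement) =====
-- stated objective: simpler
-- what changed: Replaces the two heap selections (nsmallest/nlargest), two extra sorts and the explicit min-accumulating loop with one full sort and a single min() over the four boundary differences written out directly.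
import Mathlib
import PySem

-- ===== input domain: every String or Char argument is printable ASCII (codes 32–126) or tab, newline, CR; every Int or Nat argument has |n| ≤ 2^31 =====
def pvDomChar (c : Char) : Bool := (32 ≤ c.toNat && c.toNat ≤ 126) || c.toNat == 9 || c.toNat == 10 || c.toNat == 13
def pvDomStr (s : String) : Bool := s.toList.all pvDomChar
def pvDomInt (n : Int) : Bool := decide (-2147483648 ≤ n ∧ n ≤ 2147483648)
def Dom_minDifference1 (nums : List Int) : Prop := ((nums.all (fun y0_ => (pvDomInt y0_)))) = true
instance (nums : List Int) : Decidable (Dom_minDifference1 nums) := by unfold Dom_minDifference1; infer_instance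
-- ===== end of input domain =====

-- B replaces A's heap selections and min-accumulating loop with one full sort and a
-- single min() of the four boundary differences (simpler; same behaviour).


-- ===== PORT A =====
-- heapq.nsmallest(k, xs) returns the k smallest values in ascending order; over bare Ints
-- (equal elements are identical values) this is exactly sorted(xs)[:k]. Exact on List Int.
def pyNsmallest (k : Nat) (xs : List Int) : List Int :=
  (PySem.List.sorted xs (fun x => x) false).take k
-- heapq.nlargest(k, xs): the k largest values in descending order = sorted(xs, reverse=True)[:k].
def pyNlargest (k : Nat) (xs : List Int) : List Int :=
  (PySem.List.sorted xs (fun x => x) true).take k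

def minDifference1 (nums : List Int) : Int :=
  if nums.length ≤ 4 then 0
  else
    let min_four := PySem.List.sorted (pyNsmallest 4 nums) (fun x => x) false
    let max_four := PySem.List.sorted (pyNlargest 4 nums) (fun x => x) false
    -- res = float('inf') modelled as none; the range(4) loop always runs, so the final
    -- res is some and the inf is never returned (the .getD 0 default is unreachable).
    let res : Option Int := (PySem.List.pyRange 0 4 1).foldl
      (fun (res : Option Int) i =>
        let d := PySem.List.pyGetD max_four i 0 - PySem.List.pyGetD min_four i 0
        some (match res with | none => d | some r => min r d)) none
    res.getD 0

-- ===== PORT B =====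
def minDifference1_alt (nums : List Int) : Int :=
  if nums.length ≤ 4 then 0
  else
    let s := PySem.List.sorted nums (fun x => x) false
    -- all eight indices are in range since length > 4, so the pyGetD default is never used
    min (min (min (PySem.List.pyGetD s (-4) 0 - PySem.List.pyGetD s 0 0)
                  (PySem.List.pyGetD s (-3) 0 - PySem.List.pyGetD s 1 0))
             (PySem.List.pyGetD s (-2) 0 - PySem.List.pyGetD s 2 0))
        (PySem.List.pyGetD s (-1) 0 - PySem.List.pyGetD s 3 0)

-- ===== PRECONDITION & SPEC =====
def Spec_minDifference1 (nums : List Int) (out : Int) : Prop := out = minDifference1_alt nums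
instance (nums : List Int) (out : Int) : Decidable (Spec_minDifference1 nums out) := by unfold Spec_minDifference1; infer_instance

-- ===== CLAIM (what is proved, stated in full; the proofs are below) =====
def Claim_equal_minDifference1 : Prop := ∀ (nums : List Int), Dom_minDifference1 nums → Spec_minDifference1 nums (minDifference1 nums)

-- ===== LEMMAS AND PROOFS =====

-- Python's sorted(xs, reverse=True) on bare Ints is the reverse of sorted(xs).
theorem sortedRevEq (xs : List Int) : PySem.List.sorted xs (fun x => x) true = (PySem.List.sorted xs (fun x => x) false).reverse := by
  refine List.Perm.eq_of_pairwise (le := fun a b : Int => b ≤ a) ?_ ?_ ?_ ?_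
  · intro a b _ _ h1 h2; omega
  · exact PySem.List.sorted_pairwise_rev ..
  · rw [List.pairwise_reverse]
    exact PySem.List.sorted_pairwise ..
  · exact ((PySem.List.sorted_perm xs (fun x => x) true).trans
      ((PySem.List.sorted_perm xs (fun x => x) false).symm)).trans (List.reverse_perm _).symm

-- A's min_four: sorting the 4 smallest is the first 4 of the sorted list.
theorem minFourEq (xs : List Int) :
    PySem.List.sorted ((PySem.List.sorted xs (fun x => x) false).take 4) (fun x => x) false
      = (PySem.List.sorted xs (fun x => x) false).take 4 := by
  apply PySem.List.sorted_eq_self_of_pairwise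
  exact List.Pairwise.sublist (List.take_sublist _ _) (PySem.List.sorted_pairwise ..)

-- A's max_four: sorting the 4 largest is the last 4 of the sorted list.
theorem maxFourEq (xs : List Int) :
    PySem.List.sorted ((PySem.List.sorted xs (fun x => x) true).take 4) (fun x => x) false
      = (PySem.List.sorted xs (fun x => x) false).drop ((PySem.List.sorted xs (fun x => x) false).length - 4) := by
  rw [sortedRevEq, List.take_reverse]
  apply PySem.List.sorted_id_eq_of_perm_of_pairwise
  · exact (List.reverse_perm _).symm
  · exact List.Pairwise.sublist (List.drop_sublist _ _) (PySem.List.sorted_pairwise ..)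

theorem minDifference1_eq_alt (nums : List Int) : minDifference1 nums = minDifference1_alt nums := by
  unfold minDifference1 minDifference1_alt pyNsmallest pyNlargest
  by_cases h : nums.length ≤ 4
  · simp [h]
  · simp only [if_neg h]
    have hrange : PySem.List.pyRange 0 4 1 = [0, 1, 2, 3] := by decide
    rw [hrange, minFourEq, maxFourEq]
    set s := PySem.List.sorted nums (fun x => x) false with hs
    have hlen : s.length = nums.length := PySem.List.length_sorted ..
    have h5 : 5 ≤ s.length := by omega
    simp only [List.foldl, Option.getD]
    have htake : ∀ i : Nat, i < 4 → (List.take 4 s).getD i 0 = s.getD i 0 := by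
      intro i hi
      rw [List.getD_eq_getElem _ _ (by simp [List.length_take]; omega), List.getElem_take,
          List.getD_eq_getElem _ _ (by omega)]
    have hdrop : ∀ i : Nat, i < 4 → (List.drop (s.length - 4) s).getD i 0 = s.getD (s.length - 4 + i) 0 := by
      intro i hi
      rw [List.getD_eq_getElem _ _ (by simp [List.length_drop]; omega), List.getElem_drop,
          List.getD_eq_getElem _ _ (by omega)]
    rw [PySem.List.pyGetD_neg_ofNat s 4 0 (by omega) (by omega),
        PySem.List.pyGetD_neg_ofNat s 3 0 (by omega) (by omega),
        PySem.List.pyGetD_neg_ofNat s 2 0 (by omega) (by omega),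
        PySem.List.pyGetD_neg_ofNat s 1 0 (by omega) (by omega)]
    simp only [PySem.List.pyGetD_ofNat']
    rw [htake 0 (by omega), htake 1 (by omega), htake 2 (by omega), htake 3 (by omega),
        hdrop 0 (by omega), hdrop 1 (by omega), hdrop 2 (by omega), hdrop 3 (by omega)]
    rw [List.getD_eq_getElem s _ (show s.length - 4 + 0 < s.length by omega),
        List.getD_eq_getElem s _ (show s.length - 4 + 1 < s.length by omega),
        List.getD_eq_getElem s _ (show s.length - 4 + 2 < s.length by omega),
        List.getD_eq_getElem s _ (show s.length - 4 + 3 < s.length by omega)]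
    simp only [show s.length - 4 + 0 = s.length - 4 from by omega,
               show s.length - 4 + 1 = s.length - 3 from by omega,
               show s.length - 4 + 2 = s.length - 2 from by omega,
               show s.length - 4 + 3 = s.length - 1 from by omega]

-- ===== VERDICT (by name: the statement is the Claim_ definition above) =====
theorem minDifference1_spec : Claim_equal_minDifference1 := by
  intro nums _
  unfold Spec_minDifference1
  exact minDifference1_eq_alt nums
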